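-- pv_equiv track=rewrite | github.com/nataliecc1701/Lesson19B-DataStructures | 38_min_max_key_in_dictionary/min_max_key_in_dictionary.py | min_max_keys
-- ===== SOURCE A (Python) =====
-- def min_max_keys(d):
--     """Return tuple (min-keys, max-keys) in d.
--
--         >>> min_max_keys({2: 'a', 7: 'b', 1: 'c', 10: 'd', 4: 'e'})
--         (1, 10)
--
--     Works with any kind of key that can be compared, like strings:
--
--         >>> min_max_keys({"apple": "red", "cherry": "red", "berry": "blue"})
--         ('apple', 'cherry')
--     """
--
--     min = None
--     max = None
--
--     for key in d.keys():
--         if min == None or key < min: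
--             min = key
--         if max == None or key > max:
--             max = key
--
--     return(min, max)
-- ===== SOURCE B (Python) =====
-- def min_max_keys(d):
--     ks = sorted(d)
--     if not ks:
--         return (None, None)
--     return (ks[0], ks[-1])
-- ===== Notes on version B (the rewrite author's own statement) =====
-- stated objective: idiomatic
-- what changed: B replaces A's single linear extremum-tracking loop with two optional accumulators by sorting the keys once and reading the first and last elements of the sorted list.
-- outside the precondition, e.g. on min_max_keys({}): A returns (None, None), B returns (None, None)
import Mathlib
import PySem

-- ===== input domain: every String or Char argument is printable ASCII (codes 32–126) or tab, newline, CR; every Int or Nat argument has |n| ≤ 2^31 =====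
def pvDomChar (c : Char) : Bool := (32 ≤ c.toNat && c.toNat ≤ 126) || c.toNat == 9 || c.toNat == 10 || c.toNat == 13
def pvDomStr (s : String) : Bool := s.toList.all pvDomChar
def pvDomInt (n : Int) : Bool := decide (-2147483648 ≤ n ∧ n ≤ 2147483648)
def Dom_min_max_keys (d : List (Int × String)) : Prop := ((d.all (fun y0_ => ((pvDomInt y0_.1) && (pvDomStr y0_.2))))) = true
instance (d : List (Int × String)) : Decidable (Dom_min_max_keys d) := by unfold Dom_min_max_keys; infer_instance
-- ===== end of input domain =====

-- B sorts the keys and returns the endpoints instead of A's single linear pass with two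
-- optional extremum accumulators (objective: idiomatic / alternative; not faster).

-- ===== PORT A =====
-- A's loop: one pass over d.keys() updating Optional min / max.
-- On the empty dict Python A returns (None, None), which is not a value of Int × Int;
-- Pre_ excludes it, and the final .getD 0 is only reached there.
def min_max_keys (d : List (Int × String)) : Int × Int :=
  let r := (d.map Prod.fst).foldl (fun s key =>
    ((match s.1 with | none => some key | some mn => if key < mn then some key else some mn),
     (match s.2 with | none => some key | some mx => if key > mx then some key else some mx)))
    (none, none)
  (r.1.getD 0, r.2.getD 0)

-- ===== PORT B =====
-- Source B: ks = sorted(d); empty guard (Python returns (None, None), outside Pre_); (ks[0], ks[-1]).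
def min_max_keys_alt (d : List (Int × String)) : Int × Int :=
  let ks := PySem.List.sorted (d.map Prod.fst) (fun x => x) false
  if h : ks = [] then (0, 0)
  else (ks.head h, ks.getLast h)

-- ===== PRECONDITION & SPEC =====
-- Pre_ excludes the empty dict: there Python A (and B) return (None, None), which is not an Int × Int.
def Pre_min_max_keys (d : List (Int × String)) : Prop := d ≠ []
instance (d : List (Int × String)) : Decidable (Pre_min_max_keys d) := by unfold Pre_min_max_keys; infer_instance
def pvWitness_min_max_keys : (List (Int × String)) := [(2, "a"), (7, "b"), (1, "c")]

def Spec_min_max_keys (d : List (Int × String)) (out : Int × Int) : Prop := out = min_max_keys_alt d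
instance (d : List (Int × String)) (out : Int × Int) : Decidable (Spec_min_max_keys d out) := by unfold Spec_min_max_keys; infer_instance

-- ===== CLAIM (what is proved, stated in full; the proofs are below) =====
def Claim_equal_min_max_keys : Prop := ∀ (d : List (Int × String)), Dom_min_max_keys d → Pre_min_max_keys d → Spec_min_max_keys d (min_max_keys d)

-- ===== LEMMAS AND PROOFS =====

-- A's fold, once both accumulators are set, is the running min / running max.
theorem pv_foldA (t : List Int) (m M : Int) :
    t.foldl (fun s key =>
      ((match s.1 with | none => some key | some mn => if key < mn then some key else some mn),
       (match s.2 with | none => some key | some mx => if key > mx then some key else some mx)))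
      ((some m : Option Int), (some M : Option Int))
    = (some (t.foldl min m), some (t.foldl max M)) := by
  induction t generalizing m M with
  | nil => rfl
  | cons k t ih =>
    have e1 : (if k < m then k else m) = min m k := by omega
    have e2 : (if k > M then k else M) = max M k := by omega
    simp only [List.foldl_cons]
    rw [← apply_ite (some : Int → Option Int) (k < m) k m,
        ← apply_ite (some : Int → Option Int) (k > M) k M, e1, e2]
    exact ih (min m k) (max M k)

theorem pv_head_sorted_eq_foldl_min (k : Int) (t : List Int) (h : PySem.List.sorted (k :: t) (fun x => x) false ≠ []) :
    (PySem.List.sorted (k :: t) (fun x => x) false).head h = t.foldl min k := by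
  obtain ⟨hd, tl, he⟩ := List.exists_cons_of_ne_nil h
  have hmin : PySem.List.min? (k :: t) (fun x => x) = some (t.foldl min k) :=
    PySem.List.min?_id_cons k t
  have hmem : t.foldl min k ∈ k :: t := PySem.List.min?_mem hmin
  have hisMin := PySem.List.min?_isMin hmin
  have hhd_le : ∀ y ∈ k :: t, hd ≤ y := by
    have := PySem.List.key_head_sorted_le (xs := k :: t) (key := fun x => x) he
    simpa using this
  have hhd_mem : hd ∈ k :: t := by
    have : hd ∈ PySem.List.sorted (k :: t) (fun x => x) false := by simp [he]
    exact (PySem.List.mem_sorted _ _ _ _).mp this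
  have := le_antisymm (hhd_le _ hmem) (by simpa using hisMin hd hhd_mem)
  simp [he, this]

theorem pv_getLast_sorted_eq_foldl_max (k : Int) (t : List Int) (h : PySem.List.sorted (k :: t) (fun x => x) false ≠ []) :
    (PySem.List.sorted (k :: t) (fun x => x) false).getLast h = t.foldl max k := by
  set s := PySem.List.sorted (k :: t) (fun x => x) false with hs
  have hmax : PySem.List.max? (k :: t) (fun x => x) = some (t.foldl max k) :=
    PySem.List.max?_id_cons k t
  have hmem : t.foldl max k ∈ k :: t := PySem.List.max?_mem hmax
  have hisMax := PySem.List.max?_isMax hmax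
  have hpw : s.Pairwise (fun a b => a ≤ b) := by
    have := PySem.List.sorted_pairwise (xs := k :: t) (key := fun x => x)
    simpa [hs] using this
  have hlast_mem : s.getLast h ∈ k :: t :=
    (PySem.List.mem_sorted _ _ _ _).mp (List.getLast_mem h)
  -- every element of s is ≤ its last element
  have hge : ∀ y ∈ s, y ≤ s.getLast h := by
    intro y hy
    obtain ⟨i, hi, hyi⟩ := List.getElem_of_mem hy
    rw [List.getLast_eq_getElem h, ← hyi]
    rcases Nat.lt_or_ge i (s.length - 1) with hlt | hge'
    · exact List.pairwise_iff_getElem.mp hpw i (s.length - 1) hi (by omega) hlt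
    · have hie : i = s.length - 1 := by omega
      subst hie; exact le_refl _
  have hmax_mem_s : t.foldl max k ∈ s := (PySem.List.mem_sorted _ _ _ _).mpr hmem
  exact le_antisymm (by simpa using hisMax _ hlast_mem) (hge _ hmax_mem_s)

-- ===== VERDICT (by name: the statement is the Claim_ definition above) =====
theorem min_max_keys_spec : Claim_equal_min_max_keys := by
  intro d _ hpre
  unfold Spec_min_max_keys min_max_keys min_max_keys_alt
  obtain ⟨p, rest, rfl⟩ := List.exists_cons_of_ne_nil hpre
  simp only [List.map_cons, List.foldl_cons]
  rw [pv_foldA]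
  have hne : PySem.List.sorted (p.1 :: rest.map Prod.fst) (fun x => x) false ≠ [] := by
    simp [PySem.List.sorted_eq_nil_iff]
  simp only [Option.getD_some]
  rw [dif_neg hne, pv_head_sorted_eq_foldl_min p.1 (rest.map Prod.fst) hne,
      pv_getLast_sorted_eq_foldl_max p.1 (rest.map Prod.fst) hne]
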